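-- pv_equiv track=rewrite | github.com/J1mmyChanga/EGE_Martynenkov | 23/dz/22.py | f
-- ===== SOURCE A (Python) =====
-- def f(c, e, count):
--     if c > e:
--         return 0
--     if c == e and count == 1:
--         return count == 1
--     if c == e and count != 1:
--         return 0
--     if c < e:
--         return f(c+1, e, count) + f(c+2, e, count) + f(c*2, e, count+1)
-- ===== SOURCE B (Python) =====
-- def f(c, e, count):
--     # Bottom-up DP over values x = e..c, counting paths with exactly d = 1 - count
--     # doublings; A's three-way recursion is replaced by a table filled value by value.
--     if c > e:
--         return 0
--     d = 1 - count
--     if c == e: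
--         return 1 if d == 0 else 0
--     # a path from c >= 1 with d doublings ends at a value >= 2**d, so no path if 2**d > e
--     if d < 0 or d > 32 or 2 ** d > e:
--         return 0
--     rows = [[1] + [0] * d]  # row for x = e: one empty path, zero doublings
--     for x in range(e - 1, c - 1, -1):
--         row = []
--         for k in range(d + 1):
--             t = rows[0][k]              # step +1 to x+1
--             if x + 2 <= e:
--                 t += rows[1][k]         # step +2 to x+2
--             if k >= 1 and x >= 1 and 2 * x <= e:
--                 t += rows[x - 1][k - 1] # doubling to 2*x
--             row.append(t)
--         rows.insert(0, row)
--     return rows[0][d]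
-- ===== Notes on version B (the rewrite author's own statement) =====
-- stated objective: alternative
-- what changed: Pre_ excludes c=e with count=1, where A returns the bool True rather than an int (B returns the int 1), and the inputs c<=0<e where A raises RecursionError; B replaces A's exponential three-way recursion by a bottom-up dynamic-programming table over values x=e..c that counts, per value, the paths with exactly k = 1-count doublings, plus an arithmetic cutoff (a path with d doublings from c>=1 ends at >= 2^d).
-- outside the precondition, e.g. on f(1, 1, 1): A returns True, B returns 1
import Mathlib
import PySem

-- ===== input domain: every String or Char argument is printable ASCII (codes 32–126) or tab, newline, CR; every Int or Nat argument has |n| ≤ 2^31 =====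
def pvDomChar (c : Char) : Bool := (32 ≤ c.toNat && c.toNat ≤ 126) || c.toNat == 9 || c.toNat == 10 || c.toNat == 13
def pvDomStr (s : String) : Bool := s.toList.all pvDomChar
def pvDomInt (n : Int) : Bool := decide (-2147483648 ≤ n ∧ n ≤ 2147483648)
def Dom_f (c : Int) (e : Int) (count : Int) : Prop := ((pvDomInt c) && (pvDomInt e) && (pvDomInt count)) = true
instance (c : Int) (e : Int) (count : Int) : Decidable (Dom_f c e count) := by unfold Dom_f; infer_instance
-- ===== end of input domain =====

-- B replaces A's three-way recursion with a bottom-up DP table over values (intended as faster; a timing run could not confirm a ratio on its random inputs);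
-- A raises RecursionError when c ≤ 0 and c < e (the c*2 call never progresses), excluded by Pre_f.

-- ===== PORT A =====
-- literal port of A's recursion; the fuel (e-c).toNat+1 only makes it total — on Pre_f the
-- recursion depth is at most e-c+1, so the fuel is never exhausted (proved in fAux_eq_P below)
def fAux : Nat → Int → Int → Int → Int
  | 0, _, _, _ => 0
  | n+1, c, e, count =>
    if c > e then 0
    else if c = e ∧ count = 1 then 1          -- Python returns the bool (count == 1) = True, i.e. 1
    else if c = e ∧ count ≠ 1 then 0
    else if c < e then
      fAux n (c+1) e count + fAux n (c+2) e count + fAux n (c*2) e (count+1)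
    else 0

def f (c : Int) (e : Int) (count : Int) : Int := fAux ((e - c).toNat + 1) c e count

-- ===== PORT B =====
-- inner loop of Source B: builds the DP row for value x from the rows for x+1..e
def fAltRow (e : Int) (d : Int) (rows : List (List Int)) (x : Int) : List Int :=
  (PySem.List.pyRange 0 (d+1) 1).foldl
    (fun row k =>
      let t := PySem.List.pyGetD (PySem.List.pyGetD rows 0 []) k 0
      let t := if x + 2 ≤ e then t + PySem.List.pyGetD (PySem.List.pyGetD rows 1 []) k 0 else t
      let t := if 1 ≤ k ∧ 1 ≤ x ∧ 2*x ≤ e then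
                 t + PySem.List.pyGetD (PySem.List.pyGetD rows (x-1) []) (k-1) 0
               else t
      row ++ [t]) []

def f_alt (c : Int) (e : Int) (count : Int) : Int :=
  if c > e then 0
  else
    let d := 1 - count
    if c = e then (if d = 0 then 1 else 0)
    else if d < 0 ∨ 32 < d ∨ e < 2 ^ d.toNat then 0
    else
      let rows := (PySem.List.pyRange (e-1) (c-1) (-1)).foldl
        (fun rows x => fAltRow e d rows x :: rows)
        [1 :: List.replicate d.toNat 0]
      PySem.List.pyGetD (PySem.List.pyGetD rows 0 []) d 0

-- ===== PRECONDITION & SPEC =====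
-- Pre_f excludes the inputs where A raises RecursionError (c ≤ 0 and c < e: the f(c*2, …) call
-- never reaches e), and the inputs c = e ∧ count = 1 where A returns the bool True instead of an int.
def Pre_f (c : Int) (e : Int) (count : Int) : Prop := (1 ≤ c ∨ e ≤ c) ∧ ¬(c = e ∧ count = 1)
instance (c : Int) (e : Int) (count : Int) : Decidable (Pre_f c e count) := by unfold Pre_f; infer_instance
def pvWitness_f : Int × Int × Int := (1, 5, 0)

def Spec_f (c : Int) (e : Int) (count : Int) (out : Int) : Prop := out = f_alt c e count
instance (c : Int) (e : Int) (count : Int) (out : Int) : Decidable (Spec_f c e count out) := by unfold Spec_f; infer_instance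

-- ===== CLAIM (what is proved, stated in full; the proofs are below) =====
def Claim_equal_f : Prop := ∀ (c : Int) (e : Int) (count : Int), Dom_f c e count → Pre_f c e count → Spec_f c e count (f c e count)

-- ===== LEMMAS AND PROOFS =====

-- the common mathematical value: number of paths from c to e (steps +1, +2, *2) with exactly d doublings
def P (c : Int) (e : Int) (d : Int) : Int :=
  if _h1 : e < c then 0
  else if _h2 : c = e then (if d = 0 then 1 else 0)
  else if _h3 : 1 ≤ c then P (c+1) e d + P (c+2) e d + P (2*c) e (d-1)
  else 0
termination_by (e - c).toNat
decreasing_by all_goals omega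

theorem P_gt (c e d : Int) (h : e < c) : P c e d = 0 := by
  rw [P]; simp [h]

theorem P_eq_self (e d : Int) : P e e d = (if d = 0 then 1 else 0) := by
  rw [P]; simp

theorem P_rec (c e d : Int) (h1 : 1 ≤ c) (h2 : c < e) :
    P c e d = P (c+1) e d + P (c+2) e d + P (2*c) e (d-1) := by
  rw [P]; simp [h1, h2.ne, not_lt.mpr h2.le]

theorem P_neg (c : Int) (e : Int) (d : Int) (hd : d < 0) : P c e d = 0 := by
  induction c, d using P.induct e with
  | case1 c d h => rw [P_gt _ _ _ h]
  | case2 h => omega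
  | case3 d h1 h2 => rw [P_eq_self]; simp [h1]
  | case4 c d h1 h2 h3 ih1 ih2 ih3 =>
    rw [P_rec c e d h3 (by omega)]
    rw [ih1 hd, ih2 hd, ih3 (by omega)]; ring
  | case5 c d h1 h2 h3 => rw [P]; simp [h1, h2, h3]

theorem P_nonneg (c : Int) (e : Int) (d : Int) : 0 ≤ P c e d := by
  induction c, d using P.induct e with
  | case1 c d h => rw [P_gt _ _ _ h]
  | case2 h => rw [P_eq_self]; simp
  | case3 d h1 h2 => rw [P_eq_self]; split <;> omega
  | case4 c d h1 h2 h3 ih1 ih2 ih3 =>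
    rw [P_rec c e d h3 (by omega)]; omega
  | case5 c d h1 h2 h3 => rw [P]; simp [h1, h2, h3]

theorem P_bound (c : Int) (e : Int) (d : Int) (hc : 1 ≤ c) (h : P c e d ≠ 0) :
    0 ≤ d ∧ c * 2 ^ d.toNat ≤ e := by
  induction c, d using P.induct e with
  | case1 c d h1 => rw [P_gt _ _ _ h1] at h; omega
  | case2 h1 => simpa using hc
  | case3 d h1 h2 => rw [P_eq_self] at h; simp [h1] at h
  | case4 c d h1 h2 h3 ih1 ih2 ih3 =>
    rw [P_rec c e d h3 (by omega)] at h
    have n1 := P_nonneg (c+1) e d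
    have n2 := P_nonneg (c+2) e d
    have n3 := P_nonneg (2*c) e (d-1)
    have hp : (0:Int) < 2 ^ d.toNat := by positivity
    rcases (by omega : P (c+1) e d ≠ 0 ∨ P (c+2) e d ≠ 0 ∨ P (2*c) e (d-1) ≠ 0) with hne | hne | hne
    · have hb := ih1 (by omega) hne
      exact ⟨hb.1, le_trans (by nlinarith) hb.2⟩
    · have hb := ih2 (by omega) hne
      exact ⟨hb.1, le_trans (by nlinarith) hb.2⟩
    · have hb := ih3 (by omega) hne
      have hd1 : 0 ≤ d - 1 := hb.1
      refine ⟨by omega, ?_⟩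
      have ht : (d-1).toNat + 1 = d.toNat := by omega
      calc c * 2 ^ d.toNat = 2*c * 2 ^ (d-1).toNat := by rw [← ht, pow_succ]; ring
        _ ≤ e := hb.2
  | case5 c d h1 h2 h3 => omega

-- A-side: with enough fuel the port computes P
theorem fAux_eq_P (n : Nat) (c : Int) (e : Int) (count : Int)
    (hpre : 1 ≤ c ∨ e ≤ c) (hn : (e - c).toNat < n) :
    fAux n c e count = P c e (1 - count) := by
  induction n generalizing c count with
  | zero => omega
  | succ n ih =>
    by_cases hgt : c > e
    · simp [fAux, hgt, P_gt _ _ _ hgt]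
    · by_cases heq : c = e
      · subst heq
        by_cases h1 : count = 1
        · simp [fAux, hgt, h1, P_eq_self]
        · simp [fAux, hgt, h1, P_eq_self]; omega
      · have hlt : c < e := by omega
        have hc1 : 1 ≤ c := by omega
        have e1 : fAux (n+1) c e count
            = fAux n (c+1) e count + fAux n (c+2) e count + fAux n (c*2) e (count+1) := by
          simp [fAux, hgt, heq, hlt]
        rw [e1, ih (c+1) count (by omega) (by omega), ih (c+2) count (by omega) (by omega),
            ih (c*2) (count+1) (by left; omega) (by omega)]
        rw [P_rec c e (1 - count) hc1 hlt]
        have : c * 2 = 2 * c := by ring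
        rw [this]
        have : 1 - (count + 1) = 1 - count - 1 := by ring
        rw [this]

-- B-side helpers: the intended contents of the DP rows
def rowP (e : Int) (d : Int) (v : Int) : List Int :=
  (List.range (d.toNat + 1)).map (fun (k : Nat) => P v e (k : Int))

def rowsSpec (e : Int) (d : Int) (y : Int) : List (List Int) :=
  (List.range (e - y + 1).toNat).map (fun (i : Nat) => rowP e d (y + (i : Int)))

theorem rowsSpec_cons (e d y : Int) (h : y ≤ e) :
    rowsSpec e d y = rowP e d y :: rowsSpec e d (y+1) := by
  unfold rowsSpec
  have h1 : (e - y + 1).toNat = (e - (y+1) + 1).toNat + 1 := by omega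
  rw [h1, List.range_succ_eq_map, List.map_cons, List.map_map]
  congr 1
  · norm_num
  · apply List.map_congr_left; intro i _
    simp only [Function.comp_apply]
    congr 1
    push_cast; ring

theorem rowsSpec_get (e d y : Int) (i : Int) (h0 : 0 ≤ i) (h1 : i < ((e - y + 1).toNat : Int)) :
    PySem.List.pyGetD (rowsSpec e d y) i [] = rowP e d (y + i) := by
  rw [PySem.List.pyGetD_eq_getElem _ _ h0 (by simp [rowsSpec]; omega)]
  simp only [rowsSpec, List.getElem_map, List.getElem_range]
  congr 1
  omega

theorem rowP_get (e d v k : Int) (h0 : 0 ≤ k) (h1 : k ≤ d) :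
    PySem.List.pyGetD (rowP e d v) k 0 = P v e k := by
  rw [PySem.List.pyGetD_eq_getElem _ _ h0 (by simp [rowP]; omega)]
  simp only [rowP, List.getElem_map, List.getElem_range]
  congr 1
  omega

theorem rowP_e (e d : Int) (hd : 0 ≤ d) : rowP e d e = 1 :: List.replicate d.toNat 0 := by
  unfold rowP
  rw [List.range_succ_eq_map, List.map_cons, List.map_map]
  congr 1
  · simp [P_eq_self]
  · rw [List.eq_replicate_iff]
    refine ⟨by simp, ?_⟩
    intro b hb
    simp only [List.mem_map, List.mem_range, Function.comp_apply] at hb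
    obtain ⟨a, _, rfl⟩ := hb
    rw [P_eq_self, if_neg (by omega)]

theorem fAltRow_eq (e d x : Int) (hx : 1 ≤ x) (hxe : x < e) (hd : 0 ≤ d) :
    fAltRow e d (rowsSpec e d (x+1)) x = rowP e d x := by
  unfold fAltRow
  rw [PySem.List.foldl_append_singleton_eq_map, List.nil_append, PySem.List.pyRange_one,
      List.map_map]
  unfold rowP
  have hlen : (d + 1 - 0).toNat = d.toNat + 1 := by omega
  rw [hlen]
  apply List.map_congr_left
  intro k hk
  simp only [List.mem_range] at hk
  simp only [Function.comp_apply, zero_add]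
  have hk0 : (0 : Int) ≤ (k : Int) := by positivity
  have hkd : (k : Int) ≤ d := by omega
  have hg0 : PySem.List.pyGetD (rowsSpec e d (x+1)) 0 [] = rowP e d (x+1) := by
    rw [rowsSpec_get e d (x+1) 0 le_rfl (by omega)]; norm_num
  rw [hg0, rowP_get e d (x+1) k hk0 hkd, P_rec x e k hx hxe]
  by_cases h2 : x + 2 ≤ e
  · rw [if_pos h2]
    have hg1 : PySem.List.pyGetD (rowsSpec e d (x+1)) 1 [] = rowP e d (x+2) := by
      rw [rowsSpec_get e d (x+1) 1 (by omega) (by omega)]; congr 1; ring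
    rw [hg1, rowP_get e d (x+2) k hk0 hkd]
    by_cases h3 : 1 ≤ (k : Int) ∧ 1 ≤ x ∧ 2*x ≤ e
    · rw [if_pos h3]
      have hgx : PySem.List.pyGetD (rowsSpec e d (x+1)) (x-1) [] = rowP e d (2*x) := by
        rw [rowsSpec_get e d (x+1) (x-1) (by omega) (by omega)]; congr 1; ring
      rw [hgx, rowP_get e d (2*x) ((k:Int)-1) (by omega) (by omega)]
    · rw [if_neg h3]
      have hk1 : ¬ (1 ≤ (k:Int)) ∨ ¬ (2*x ≤ e) := by tauto
      rcases hk1 with hk1 | hk1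
      · rw [P_neg (2*x) e ((k:Int)-1) (by omega)]; ring
      · rw [P_gt (2*x) e ((k:Int)-1) (by omega)]; ring
  · rw [if_neg h2, P_gt (x+2) e (k:Int) (by omega)]
    by_cases h3 : 1 ≤ (k : Int) ∧ 1 ≤ x ∧ 2*x ≤ e
    · rw [if_pos h3]
      have hgx : PySem.List.pyGetD (rowsSpec e d (x+1)) (x-1) [] = rowP e d (2*x) := by
        rw [rowsSpec_get e d (x+1) (x-1) (by omega) (by omega)]; congr 1; ring
      rw [hgx, rowP_get e d (2*x) ((k:Int)-1) (by omega) (by omega)]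
      ring
    · rw [if_neg h3]
      have hk1 : ¬ (1 ≤ (k:Int)) ∨ ¬ (2*x ≤ e) := by tauto
      rcases hk1 with hk1 | hk1
      · rw [P_neg (2*x) e ((k:Int)-1) (by omega)]; ring
      · rw [P_gt (2*x) e ((k:Int)-1) (by omega)]; ring

theorem fold_eq_aux (e d c : Int) (hc : 1 ≤ c) (hd : 0 ≤ d) (n : Nat) :
    ∀ (y : Int), (y - (c-1)).toNat = n → c - 1 ≤ y → y ≤ e - 1 →
    (PySem.List.pyRange y (c-1) (-1)).foldl (fun rows x => fAltRow e d rows x :: rows)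
      (rowsSpec e d (y+1)) = rowsSpec e d c := by
  induction n with
  | zero =>
    intro y h0 h1 h2
    have hy : y = c - 1 := by omega
    subst hy
    rw [PySem.List.pyRange_neg_one_eq_nil le_rfl, List.foldl_nil]
    congr 1
    omega
  | succ n ih =>
    intro y h0 h1 h2
    have hy : c - 1 < y := by omega
    rw [PySem.List.pyRange_neg_one_cons hy, List.foldl_cons,
        fAltRow_eq e d y (by omega) (by omega) hd,
        ← rowsSpec_cons e d y (by omega)]
    have hy1 : rowsSpec e d y = rowsSpec e d ((y-1)+1) := by norm_num
    rw [hy1]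
    exact ih (y-1) (by omega) (by omega) (by omega)

theorem fold_eq (e d c : Int) (hc : 1 ≤ c) (hce : c < e) (hd : 0 ≤ d) :
    (PySem.List.pyRange (e-1) (c-1) (-1)).foldl
      (fun rows x => fAltRow e d rows x :: rows) [1 :: List.replicate d.toNat 0]
    = rowsSpec e d c := by
  have hinit : [1 :: List.replicate d.toNat 0] = rowsSpec e d ((e-1)+1) := by
    rw [← rowP_e e d hd]
    unfold rowsSpec
    rw [show (e - (e-1+1) + 1).toNat = 1 by omega]
    simp
  rw [hinit]
  exact fold_eq_aux e d c hc hd ((e-1) - (c-1)).toNat (e-1) rfl (by omega) (by omega)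

theorem dom_e_bound (c e count : Int) (h : Dom_f c e count) : e ≤ 2147483648 := by
  unfold Dom_f pvDomInt at h
  simp only [Bool.and_eq_true, decide_eq_true_eq] at h
  omega

theorem f_alt_eq_P (c e count : Int) (hDom : Dom_f c e count) (hpre : 1 ≤ c ∨ e ≤ c) :
    f_alt c e count = P c e (1 - count) := by
  unfold f_alt
  by_cases hgt : c > e
  · rw [if_pos hgt, P_gt _ _ _ hgt]
  · rw [if_neg hgt]
    simp only []
    by_cases heq : c = e
    · subst heq
      rw [if_pos rfl, P_eq_self]
    · rw [if_neg heq]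
      have hc1 : 1 ≤ c := by omega
      have hce : c < e := by omega
      have he : e ≤ 2147483648 := dom_e_bound c e count hDom
      by_cases hguard : 1 - count < 0 ∨ 32 < 1 - count ∨ e < 2 ^ (1 - count).toNat
      · rw [if_pos hguard]
        by_contra hP
        have hPne : P c e (1 - count) ≠ 0 := fun hh => hP hh.symm
        have hb := P_bound c e (1 - count) hc1 hPne
        have hpow : (0:Int) < 2 ^ (1 - count).toNat := by positivity
        have h2e : (2:Int) ^ (1 - count).toNat ≤ e := by nlinarith [hb.2]
        rcases hguard with hg | hg | hg
        · omega
        · have h33 : (33 : Nat) ≤ (1 - count).toNat := by omega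
          have : (2:Int) ^ (33:Nat) ≤ 2 ^ (1 - count).toNat := by
            exact_mod_cast pow_le_pow_right₀ (by norm_num) h33
          norm_num at this
          omega
        · omega
      · rw [if_neg hguard]
        push Not at hguard
        have hd : 0 ≤ 1 - count := hguard.1
        rw [fold_eq e (1 - count) c hc1 hce hd,
            rowsSpec_get e (1 - count) c 0 le_rfl (by omega)]
        rw [show c + 0 = c by ring, rowP_get e (1 - count) c (1 - count) hd le_rfl]

-- ===== VERDICT (by name: the statement is the Claim_ definition above) =====
theorem f_spec : Claim_equal_f := by
  intro c e count hDom hpre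
  unfold Spec_f
  rw [show f c e count = fAux ((e - c).toNat + 1) c e count from rfl,
      fAux_eq_P _ _ _ _ hpre.1 (by omega), f_alt_eq_P c e count hDom hpre.1]
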